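-- pv_equiv track=rewrite | github.com/Dirk-Hoffmann/Project-6 | dot25-algo.py | evens
-- ===== SOURCE A (Python) =====
-- def evens(hp_string):
--     index = 0
--     S_odd_indexes = []
--     S_even_indexes = []
--     for i in hp_string:
--         if i == "h" or i == "H":
--             if index%2 == 0:
--                 S_even_indexes.append(index)
--             else:
--                 S_odd_indexes.append(index)
--         elif i == "p" or i == "P":
--             None
--         else:
--             raise NameError("string does not consist  of only H and P")
--         index+=1
--
--     return S_even_indexes
-- ===== SOURCE B (Python) =====
-- def evens(hp_string):
--     # validate via set containment, then look only at the even positions via a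
--     # stride-2 slice and rescale the indices back by 2
--     if not set(hp_string) <= set("hHpP"):
--         raise NameError("string does not consist  of only H and P")
--     return [2 * j for j, c in enumerate(hp_string[::2]) if c in "hH"]
-- ===== Notes on version B (the rewrite author's own statement) =====
-- stated objective: simpler
-- what changed: Instead of A's single interleaved scan with an index counter and two accumulators, B validates via set containment and then only traverses the even positions (a stride-2 slice), rescaling the slice's indices by 2; no index parity test and no odd-index accumulator exist in B.
import Mathlib
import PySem

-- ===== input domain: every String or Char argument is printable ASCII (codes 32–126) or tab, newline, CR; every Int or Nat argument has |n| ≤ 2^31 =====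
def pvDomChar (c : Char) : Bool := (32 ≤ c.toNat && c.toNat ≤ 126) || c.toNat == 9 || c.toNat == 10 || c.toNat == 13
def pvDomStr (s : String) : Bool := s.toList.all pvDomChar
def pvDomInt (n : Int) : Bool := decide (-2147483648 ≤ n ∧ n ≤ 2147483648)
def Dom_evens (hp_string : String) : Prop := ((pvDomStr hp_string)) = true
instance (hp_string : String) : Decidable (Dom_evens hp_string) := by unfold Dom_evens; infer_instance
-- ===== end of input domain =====

-- B looks only at the even positions (a stride-2 slice, indices rescaled by 2) after a
-- set-containment validation; objective: simpler. Pre_ excludes inputs with a character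
-- outside hHpP, on which both Pythons raise NameError.


-- ===== PORT A =====
-- single loop with index counter and two accumulators; on a character outside hHpP the
-- Python raises NameError (excluded by Pre_evens), here the state is left unchanged.
def evens (hp_string : String) : List Int :=
  (hp_string.toList.foldl
    (fun (st : Int × List Int × List Int) (i : Char) =>
      let (index, S_odd, S_even) := st
      if i = 'h' ∨ i = 'H' then
        if index % 2 = 0 then (index + 1, S_odd, S_even ++ [index])
        else (index + 1, S_odd ++ [index], S_even)
      else  -- 'p'/'P': skip; any other char: Python raises (outside Pre_evens)
        (index + 1, S_odd, S_even))
    (0, [], [])).2.2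

-- ===== PORT B =====
-- hp_string[::2]: PySem.List.slice has no step, so the stride-2 slice is ported by hand;
-- exact: Python's s[::2] takes the elements at positions 0, 2, 4, …
def everyOther {α : Type} : List α → List α
  | [] => []
  | [c] => [c]
  | c :: _ :: t => c :: everyOther t

-- validation by set containment raises outside Pre_evens; inside Pre_evens it is a no-op,
-- then the comprehension rescales the slice's indices by 2
def evens_alt (hp_string : String) : List Int :=
  (PySem.List.enumerate (everyOther hp_string.toList) 0).filterMap
    (fun p => if p.2 = 'h' ∨ p.2 = 'H' then some (2 * p.1) else none)

-- ===== PRECONDITION & SPEC =====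
-- Pre_: every character is one of h H p P; otherwise A (and B) raise NameError.
def Pre_evens (hp_string : String) : Prop :=
  hp_string.toList.all (fun c => c = 'h' ∨ c = 'H' ∨ c = 'p' ∨ c = 'P') = true
instance (hp_string : String) : Decidable (Pre_evens hp_string) := by unfold Pre_evens; infer_instance
def pvWitness_evens : String := "HpHp"

def Spec_evens (hp_string : String) (out : List Int) : Prop := out = evens_alt hp_string
instance (hp_string : String) (out : List Int) : Decidable (Spec_evens hp_string out) := by unfold Spec_evens; infer_instance

-- ===== CLAIM (what is proved, stated in full; the proofs are below) =====
def Claim_equal_evens : Prop := ∀ (hp_string : String), Dom_evens hp_string → Pre_evens hp_string → Spec_evens hp_string (evens hp_string)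

-- ===== LEMMAS AND PROOFS =====

-- A's loop body, named for the lemmas
def evensStep : Int × List Int × List Int → Char → Int × List Int × List Int :=
  fun st i =>
    let (index, S_odd, S_even) := st
    if i = 'h' ∨ i = 'H' then
      if index % 2 = 0 then (index + 1, S_odd, S_even ++ [index])
      else (index + 1, S_odd ++ [index], S_even)
    else
      (index + 1, S_odd, S_even)

-- loop invariant: A's fold from an even start index 2k appends, to the even accumulator,
-- exactly B's rescaled filter over the enumeration of the stride-2 sublist started at k
lemma evens_loop (l : List Char) (k : Int) (odds ev : List Int) :
    (l.foldl evensStep (2 * k, odds, ev)).2.2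
    = ev ++ (PySem.List.enumerate (everyOther l) k).filterMap
        (fun p => if p.2 = 'h' ∨ p.2 = 'H' then some (2 * p.1) else none) := by
  induction l using everyOther.induct (α := Char) generalizing k odds ev with
  | case1 => simp [everyOther, PySem.List.enumerate_nil]
  | case2 c =>
    by_cases hc : c = 'h' ∨ c = 'H' <;>
      simp [everyOther, PySem.List.enumerate_cons, PySem.List.enumerate_nil,
        evensStep, hc, Int.mul_emod_right]
  | case3 c d t ih =>
    have h2 : (2 * k) % 2 = 0 := Int.mul_emod_right 2 k
    have hodd : (2 * k + 1) % 2 = 1 := by omega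
    have hnext : (2 * k + 1) + 1 = 2 * (k + 1) := by ring
    by_cases hc : c = 'h' ∨ c = 'H' <;> by_cases hd : d = 'h' ∨ d = 'H' <;>
      simp only [everyOther, List.foldl_cons, PySem.List.enumerate_cons,
        List.filterMap_cons, evensStep, hc, hd, h2, hodd, if_true, if_false, one_ne_zero, hnext] <;>
      rw [ih] <;> simp

-- ===== VERDICT (by name: the statement is the Claim_ definition above) =====
theorem evens_spec : Claim_equal_evens := by
  intro s _ _
  unfold Spec_evens evens evens_alt
  have h := evens_loop s.toList 0 [] []
  norm_num at h
  exact h
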